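-- pv_equiv track=rewrite | github.com/Jungsu-lilly/coding_test_study | 프로그래머스/lv2/김서영/142085.py | solution
-- ===== SOURCE A (Python) =====
-- import heapq
--
-- def solution(n, k, enemy):
--     """
--     while로 돌면서 n+무적권 써도 안되는 경우 리턴하고, 그 전까지는
--     - hq에 enemy값 넣고 n에서 빼주기
--     - n 0보다 작아지면 무적권으로 보강
--
--     while 조건
--     """
--     if len(enemy) == k: return k
--
--     idx = 0
--     hq = []
--     while idx < len(enemy):
--         e = enemy[idx]
--         heapq.heappush(hq, -e)
--         n -= e
--         if n<0:
--             if k: # 무적권 사용 가능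
--                 # 무적권으로 보강(음수로 저장하고 있으니까 빼주기)
--                 n -= heapq.heappop(hq)
--                 k-=1
--             else:
--                 return idx
--         idx += 1
--     return idx
-- ===== SOURCE B (Python) =====
-- def solution(n, k, enemy):
--     # Max stages passed: stage m fails iff even spending the k tokens on the
--     # k largest of the first m+1 healths, the rest exceeds n.
--     for m in range(k, len(enemy)):
--         if sum(sorted(enemy[:m+1])[:m+1-k]) > n:
--             return m
--     return len(enemy)
-- ===== Notes on version B (the rewrite author's own statement) =====
-- stated objective: simpler
-- what changed: Replaces the incremental heap simulation (push each health, reactively pop the max when the budget goes negative) by a direct scan for the first unclearable prefix: a prefix of m+1 stages is unclearable iff the sum of its m+1-k smallest healths exceeds n; B is plainer and shorter but re-sorts each prefix, trading speed (O(n^2 log n) vs A's O(n log n)).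
-- outside the precondition, e.g. on solution(4, -2, [6]): A returns 1, B returns 0; on solution(1, 1, [3, -2, 6]): A returns 2, B returns 3
import Mathlib
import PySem

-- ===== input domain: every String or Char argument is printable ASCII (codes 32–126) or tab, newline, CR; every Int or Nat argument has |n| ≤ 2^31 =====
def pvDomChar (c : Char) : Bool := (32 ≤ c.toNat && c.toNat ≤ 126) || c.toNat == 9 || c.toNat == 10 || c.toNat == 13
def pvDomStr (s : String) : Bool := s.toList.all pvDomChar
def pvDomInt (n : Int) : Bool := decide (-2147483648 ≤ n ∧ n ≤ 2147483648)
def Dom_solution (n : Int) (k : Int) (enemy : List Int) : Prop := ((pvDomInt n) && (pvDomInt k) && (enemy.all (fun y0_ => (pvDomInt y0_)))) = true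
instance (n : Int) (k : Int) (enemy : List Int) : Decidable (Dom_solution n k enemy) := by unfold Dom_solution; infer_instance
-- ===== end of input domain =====

-- B replaces the heap simulation by a scan for the first unclearable prefix
-- (sum of the m+1-k smallest healths of the first m+1 stages exceeds n): simpler, not faster.

-- ===== PORT A =====
-- heapq.heappush then heappop on the heap '(-e) :: hq': returns the minimum value and the
-- list with one occurrence of that value removed — exact on values (heap layout is internal).
def pyHeappop (x : Int) (xs : List Int) : Int × List Int :=
  (xs.foldl min x, (x :: xs).erase (xs.foldl min x))

def solGo (n k : Int) (hq : List Int) (idx : Int) : List Int → Int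
  | [] => idx
  | e :: rest =>
    let n' := n - e
    if n' < 0 then
      if k ≠ 0 then
        let p := pyHeappop (-e) hq
        solGo (n' - p.1) (k - 1) p.2 (idx + 1) rest
      else idx
    else solGo n' k ((-e) :: hq) (idx + 1) rest

def solution (n : Int) (k : Int) (enemy : List Int) : Int :=
  if (enemy.length : Int) = k then k else solGo n k [] 0 enemy

-- ===== PORT B =====
def altGo (n k : Int) (enemy : List Int) : List Int → Int
  | [] => (enemy.length : Int)
  | m :: ms =>
    if n < (PySem.List.slice (PySem.List.sorted (PySem.List.slice enemy none (some (m + 1))) (fun x => x) false) none (some (m + 1 - k))).sum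
    then m
    else altGo n k enemy ms

def solution_alt (n : Int) (k : Int) (enemy : List Int) : Int :=
  altGo n k enemy (PySem.List.pyRange k (enemy.length : Int) 1)

-- ===== PRECONDITION & SPEC =====
-- Pre_ restricts to the problem's natural domain: a nonnegative token count k, and (unless the
-- run is degenerate because k = 0 or there are at most k stages) nonnegative stage healths;
-- negative k or negative healths are outside the puzzle's input specification.
def Pre_solution (n : Int) (k : Int) (enemy : List Int) : Prop :=
  0 ≤ k ∧ (k = 0 ∨ (enemy.length : Int) ≤ k ∨ ∀ e ∈ enemy, 0 ≤ e)
instance (n : Int) (k : Int) (enemy : List Int) : Decidable (Pre_solution n k enemy) := by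
  unfold Pre_solution; infer_instance

def pvWitness_solution : Int × Int × List Int := (7, 1, [4, 2, 4, 8, 1])

def Spec_solution (n : Int) (k : Int) (enemy : List Int) (out : Int) : Prop := out = solution_alt n k enemy
instance (n : Int) (k : Int) (enemy : List Int) (out : Int) : Decidable (Spec_solution n k enemy out) := by unfold Spec_solution; infer_instance

-- ===== CLAIM (what is proved, stated in full; the proofs are below) =====
def Claim_equal_solution : Prop := ∀ (n : Int) (k : Int) (enemy : List Int), Dom_solution n k enemy → Pre_solution n k enemy → Spec_solution n k enemy (solution n k enemy)

-- ===== LEMMAS AND PROOFS =====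

-- cost of clearing the prefix X with k0 tokens: sum of its |X| - k0 smallest healths.
def costOf (k0 : Int) (X : List Int) : Int :=
  ((PySem.List.sorted X (fun x => x) false).take (X.length - k0.toNat)).sum

-- stage m (0-based) is unclearable (checked only from m = k0 on, as B does)
def condD (n0 k0 : Int) (enemy : List Int) (m : Nat) : Bool :=
  decide (k0 ≤ (m : Int)) && decide (n0 < costOf k0 (enemy.take (m + 1)))

-- first unclearable stage index ≥ i, else the number of stages
def FF (n0 k0 : Int) (enemy : List Int) (i : Nat) : Int :=
  match (List.range' i (enemy.length - i)).find? (condD n0 k0 enemy) with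
  | some m => (m : Int)
  | none => (enemy.length : Int)

-- loop invariant of A: pd = healths already cancelled by tokens, hq = the heap (negated)
def INV (n0 k0 : Int) (P : List Int) (n : Int) (hq : List Int) (k : Int) : Prop :=
  ∃ pd : List Int,
    (hq.map (fun x => -x) ++ pd).Perm P ∧
    (0 ≤ k ∧ k ≤ k0 ∧ (pd.length : Int) = k0 - k) ∧
    n = n0 - P.sum + pd.sum ∧
    (∀ p ∈ pd, n < p) ∧
    (∀ x ∈ hq, ∀ p ∈ pd, -x ≤ p) ∧
    (0 ≤ n ∨ pd.length = P.length)

-- shorthand for Python's sorted(xs) on ints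
def ps (X : List Int) : List Int := PySem.List.sorted X (fun x => x) false

lemma ps_perm (X : List Int) : (ps X).Perm X := PySem.List.sorted_perm X _ false

lemma ps_pairwise (X : List Int) : (ps X).Pairwise (· ≤ ·) := PySem.List.sorted_pairwise X (fun x => x)

lemma ps_eq (X s : List Int) (hp : s.Perm X) (hs : s.Pairwise (· ≤ ·)) : ps X = s :=
  PySem.List.sorted_id_eq_of_perm_of_pairwise X s hp hs

lemma foldl_min_mem : ∀ (l : List Int) (a : Int), l.foldl min a ∈ a :: l := by
  intro l
  induction l with
  | nil => intro a; simp
  | cons b t ih =>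
    intro a
    have h := ih (min a b)
    rcases List.mem_cons.1 h with h1 | h1
    · rcases min_choice a b with hm | hm <;> rw [List.foldl_cons, h1, hm] <;> simp
    · simp [List.foldl_cons]
      right; right; exact h1

lemma foldl_min_le : ∀ (l : List Int) (a : Int), ∀ y ∈ a :: l, l.foldl min a ≤ y := by
  intro l
  induction l with
  | nil => intro a y hy; simp at hy; simp [hy]
  | cons b t ih =>
    intro a y hy
    rw [List.foldl_cons]
    rcases List.mem_cons.1 hy with h1 | h1
    · calc t.foldl min (min a b) ≤ min a b := ih (min a b) _ (by simp)
        _ ≤ y := by rw [h1]; exact min_le_left a b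
    · rcases List.mem_cons.1 h1 with h2 | h2
      · calc t.foldl min (min a b) ≤ min a b := ih (min a b) _ (by simp)
          _ ≤ y := by rw [h2]; exact min_le_right a b
      · exact ih (min a b) y (by simp [h2])

lemma sum_take_le_of_nonneg (s : List Int) (c : Nat) (h : ∀ x ∈ s, 0 ≤ x) :
    (s.take c).sum ≤ s.sum := by
  conv_rhs => rw [← List.take_append_drop c s]
  rw [List.sum_append]
  have : 0 ≤ (s.drop c).sum := by
    apply List.sum_nonneg
    intro x hx
    exact h x (List.mem_of_mem_drop hx)
  omega

lemma head_le_getElem (a : Int) (t : List Int) (hp : (a :: t).Pairwise (· ≤ ·))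
    (i : Nat) (hi : i < (a :: t).length) : a ≤ (a :: t)[i] := by
  match i with
  | 0 => simp
  | j + 1 =>
    have ht : ∀ b ∈ t, a ≤ b := (List.pairwise_cons.1 hp).1
    rw [List.getElem_cons_succ]
    exact ht _ (List.getElem_mem _)

-- inserting one element into a sorted list does not increase the sum of the c smallest
lemma orderedInsert_take_sum_le : ∀ (t : List Int) (c : Nat) (z : Int),
    t.Pairwise (· ≤ ·) → c ≤ t.length →
    ((List.orderedInsert (· ≤ ·) z t).take c).sum ≤ (t.take c).sum := by
  intro t
  induction t with
  | nil =>
    intro c z _ hc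
    have : c = 0 := Nat.le_zero.mp hc
    subst this
    simp [List.orderedInsert]
  | cons a t' ih =>
    intro c z hp hc
    match c with
    | 0 => simp
    | c' + 1 =>
      rw [List.orderedInsert]
      by_cases hza : z ≤ a
      · rw [if_pos hza]
        have hlt : c' < (a :: t').length := by simpa using hc
        rw [List.take_succ_cons, List.sum_cons, List.sum_take_succ _ c' hlt]
        have hz2 : z ≤ (a :: t')[c'] := le_trans hza (head_le_getElem a t' hp c' hlt)
        omega
      · rw [if_neg hza, List.take_succ_cons, List.take_succ_cons, List.sum_cons, List.sum_cons]
        have := ih c' z (List.pairwise_cons.1 hp).2 (by simpa using hc)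
        omega

-- S1: the c smallest of X sum to at most any c (or more) of its elements (nonneg healths)
lemma S1 : ∀ (Z X Y : List Int) (c : Nat), (Y ++ Z).Perm X → (∀ x ∈ X, 0 ≤ x) →
    c ≤ Y.length → ((ps X).take c).sum ≤ Y.sum := by
  intro Z
  induction Z with
  | nil =>
    intro X Y c hp hNN hc
    have h1 : ((ps X).take c).sum ≤ (ps X).sum :=
      sum_take_le_of_nonneg (ps X) c (fun x hx => hNN x ((ps_perm X).subset hx))
    have h2 : (ps X).sum = Y.sum := ((ps_perm X).trans (by simpa using hp.symm)).sum_eq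
    omega
  | cons z Z' ih =>
    intro X Y c hp hNN hc
    have hsub : ∀ x ∈ Y ++ Z', 0 ≤ x := by
      intro x hx
      apply hNN
      apply hp.subset
      rcases List.mem_append.1 hx with h | h
      · exact List.mem_append.2 (Or.inl h)
      · exact List.mem_append.2 (Or.inr (List.mem_cons_of_mem z h))
    have hih := ih (Y ++ Z') Y c (List.Perm.refl _) hsub hc
    have hOI : ps X = List.orderedInsert (· ≤ ·) z (ps (Y ++ Z')) := by
      apply ps_eq
      · exact ((List.perm_orderedInsert _ z _).trans
          (((List.Perm.cons z (ps_perm _)).trans List.perm_middle.symm).trans hp))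
      · exact List.Pairwise.orderedInsert z _ (ps_pairwise _)
    rw [hOI]
    have hlen : c ≤ (ps (Y ++ Z')).length := by
      simp only [ps, PySem.List.length_sorted, List.length_append]
      omega
    exact le_trans (orderedInsert_take_sum_le (ps (Y ++ Z')) c z (ps_pairwise _) hlen) hih

-- S2: if every element of Y is ≤ every element of Z, the |Y| smallest of X sum exactly to Y
lemma S2 (X Y Z : List Int) (hp : (Y ++ Z).Perm X) (hle : ∀ y ∈ Y, ∀ z ∈ Z, y ≤ z) :
    ((ps X).take Y.length).sum = Y.sum := by
  have hps : ps X = ps Y ++ ps Z := by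
    apply ps_eq
    · exact ((ps_perm Y).append (ps_perm Z)).trans hp
    · refine List.pairwise_append.2 ⟨ps_pairwise Y, ps_pairwise Z, ?_⟩
      intro a ha b hb
      exact hle a ((ps_perm Y).subset ha) b ((ps_perm Z).subset hb)
  rw [hps, List.take_left' (by simp [ps, PySem.List.length_sorted])]
  exact (ps_perm Y).sum_eq

-- L1: any pd of ≤ k0 cancelled healths bounds the clearing cost from above
lemma L1 (k0 : Int) (P pd hqm : List Int) (hp : (hqm ++ pd).Perm P)
    (hNN : ∀ x ∈ P, 0 ≤ x) (hlen : (pd.length : Int) ≤ k0) :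
    costOf k0 P ≤ P.sum - pd.sum := by
  have hL : hqm.length + pd.length = P.length := by
    have := hp.length_eq
    simpa using this
  have hsum : hqm.sum + pd.sum = P.sum := by
    have := hp.sum_eq
    simpa using this
  have hc : P.length - k0.toNat ≤ hqm.length := by omega
  have h1 := S1 pd P hqm (P.length - k0.toNat) hp hNN hc
  have h2 : costOf k0 P = ((ps P).take (P.length - k0.toNat)).sum := rfl
  omega

-- L2: at A's failure point the prefix really is unclearable
lemma L2 (k0 n0 n e : Int) (P pd hqm : List Int) (hp : (hqm ++ pd).Perm P)
    (hNN : ∀ x ∈ P, 0 ≤ x) (he : 0 ≤ e) (hlen : (pd.length : Int) = k0)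
    (hD : ∀ p ∈ pd, n < p) (hE : ∀ x ∈ hqm, ∀ p ∈ pd, x ≤ p)
    (hn : n = n0 - P.sum + pd.sum) (hfail : n - e < 0) :
    n0 < costOf k0 (P ++ [e]) := by
  have hL : hqm.length + pd.length = P.length := by
    have := hp.length_eq; simpa using this
  have hsum : hqm.sum + pd.sum = P.sum := by
    have := hp.sum_eq; simpa using this
  have hcost : costOf k0 (P ++ [e]) = ((ps (P ++ [e])).take ((P ++ [e]).length - k0.toNat)).sum := rfl
  have hlenX : (P ++ [e]).length - k0.toNat = hqm.length + 1 := by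
    simp only [List.length_append, List.length_cons, List.length_nil]
    omega
  by_cases hA : ∀ p ∈ pd, e ≤ p
  · have hperm : ((hqm ++ [e]) ++ pd).Perm (P ++ [e]) := by
      have h1 : ((hqm ++ [e]) ++ pd).Perm ((hqm ++ pd) ++ [e]) := by
        rw [List.append_assoc, List.append_assoc]
        exact List.Perm.append_left hqm List.perm_append_comm
      exact h1.trans (hp.append_right [e])
    have hle : ∀ y ∈ hqm ++ [e], ∀ z ∈ pd, y ≤ z := by
      intro y hy z hz
      rcases List.mem_append.1 hy with h | h
      · exact hE y h z hz
      · simp at h; subst h; exact hA z hz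
    have h2 := S2 (P ++ [e]) (hqm ++ [e]) pd hperm hle
    rw [List.length_append] at h2
    simp only [List.length_cons, List.length_nil, List.sum_append, List.sum_cons,
      List.sum_nil] at h2
    rw [hcost, hlenX, h2]
    omega
  · push_neg at hA
    obtain ⟨p0, hp0, hp0e⟩ := hA
    match pd, hp0 with
    | q :: pd', hp0 =>
      have hmmem : pd'.foldl min q ∈ q :: pd' := foldl_min_mem pd' q
      have hmle : ∀ y ∈ q :: pd', pd'.foldl min q ≤ y := foldl_min_le pd' q
      set m := pd'.foldl min q with hm
      have hme : m < e := lt_of_le_of_lt (hmle p0 hp0) hp0e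
      have hperm : ((hqm ++ [m]) ++ (e :: (q :: pd').erase m)).Perm (P ++ [e]) := by
        have h1 : (m :: e :: (q :: pd').erase m).Perm ((q :: pd') ++ [e]) := by
          have hswap : (m :: e :: (q :: pd').erase m).Perm (e :: m :: (q :: pd').erase m) :=
            List.Perm.swap e m _
          have h2 : (e :: m :: (q :: pd').erase m).Perm (e :: (q :: pd')) :=
            List.Perm.cons e (List.perm_cons_erase hmmem).symm
          exact (hswap.trans h2).trans (List.perm_append_comm (l₁ := [e]))
        have hstep1 : ((hqm ++ [m]) ++ (e :: (q :: pd').erase m)).Perm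
            (hqm ++ (m :: e :: (q :: pd').erase m)) := by
          rw [List.append_assoc]
          rfl
        have hstep2 : (hqm ++ (m :: e :: (q :: pd').erase m)).Perm
            (hqm ++ ((q :: pd') ++ [e])) := List.Perm.append_left hqm h1
        have hstep3 : (hqm ++ ((q :: pd') ++ [e])).Perm (P ++ [e]) := by
          rw [← List.append_assoc]
          exact hp.append_right [e]
        exact (hstep1.trans hstep2).trans hstep3
      have hle : ∀ y ∈ hqm ++ [m], ∀ z ∈ e :: (q :: pd').erase m, y ≤ z := by
        intro y hy z hz
        rcases List.mem_append.1 hy with h | h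
        · rcases List.mem_cons.1 hz with h2 | h2
          · subst h2; exact le_trans (hE y h m hmmem) (le_of_lt hme)
          · exact hE y h z (List.mem_of_mem_erase h2)
        · simp at h; subst h
          rcases List.mem_cons.1 hz with h2 | h2
          · subst h2; exact le_of_lt hme
          · exact hmle z (List.mem_of_mem_erase h2)
      have h2 := S2 (P ++ [e]) (hqm ++ [m]) (e :: (q :: pd').erase m) hperm hle
      rw [List.length_append] at h2
      simp only [List.length_cons, List.length_nil, List.sum_append, List.sum_cons,
        List.sum_nil] at h2
      rw [hcost, hlenX, h2]
      have hnm := hD m hmmem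
      omega

lemma FF_last (n0 k0 : Int) (enemy : List Int) (i : Nat) (h : enemy.length ≤ i) :
    FF n0 k0 enemy i = (enemy.length : Int) := by
  unfold FF
  have : enemy.length - i = 0 := by omega
  rw [this]
  simp

lemma FF_cons (n0 k0 : Int) (enemy : List Int) (i : Nat) (h : i < enemy.length) :
    FF n0 k0 enemy i = if condD n0 k0 enemy i then (i : Int) else FF n0 k0 enemy (i + 1) := by
  unfold FF
  have h1 : enemy.length - i = (enemy.length - (i + 1)) + 1 := by omega
  rw [h1, List.range'_succ, List.find?_cons]
  cases hc : condD n0 k0 enemy i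
  · simp [hc]
  · simp

-- B's per-stage test equals condD (for k0 ≤ i < len)
lemma cond_bridge (n0 k0 : Int) (enemy : List Int) (i : Nat) (hk : 0 ≤ k0)
    (hki : k0 ≤ (i : Int)) (hi : i < enemy.length) :
    (n0 < (PySem.List.slice (PySem.List.sorted (PySem.List.slice enemy none (some ((i : Int) + 1))) (fun x => x) false) none (some ((i : Int) + 1 - k0))).sum)
    = (condD n0 k0 enemy i = true) := by
  have hcast : ((i : Int) + 1) = ((i + 1 : Nat) : Int) := by push_cast; ring
  have h1 : PySem.List.slice enemy none (some ((i : Int) + 1)) = enemy.take (i + 1) := by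
    rw [hcast, PySem.List.slice_to_natCast]
  have hb : (0 : Int) ≤ (i : Int) + 1 - k0 := by omega
  have h2 := PySem.List.slice_to
    (PySem.List.sorted (enemy.take (i + 1)) (fun x => x) false) hb
  have h3 : ((i : Int) + 1 - k0).toNat = (i + 1) - k0.toNat := by omega
  have hXlen : (enemy.take (i + 1)).length = i + 1 := by
    rw [List.length_take]
    omega
  rw [h1, h2, h3]
  simp only [condD, costOf, hXlen, eq_iff_iff]
  rw [decide_eq_true hki]
  simp [ps]

-- B computes FF from index k0 on
lemma altGo_eq (n0 k0 : Int) (enemy : List Int) (hk : 0 ≤ k0) :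
    ∀ (d i : Nat), enemy.length - i ≤ d → k0 ≤ (i : Int) →
    altGo n0 k0 enemy (PySem.List.pyRange (i : Int) (enemy.length : Int) 1) = FF n0 k0 enemy i := by
  intro d
  induction d with
  | zero =>
    intro i hd hki
    have hlen : enemy.length ≤ i := by omega
    rw [PySem.List.pyRange_one_eq_nil (by omega), FF_last n0 k0 enemy i hlen]
    rfl
  | succ d ihd =>
    intro i hd hki
    by_cases hlen : enemy.length ≤ i
    · rw [PySem.List.pyRange_one_eq_nil (by omega), FF_last n0 k0 enemy i hlen]
      rfl
    · push_neg at hlen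
      rw [PySem.List.pyRange_one_cons (by omega), altGo]
      rw [FF_cons n0 k0 enemy i hlen]
      have hcb := cond_bridge n0 k0 enemy i hk hki hlen
      by_cases hcd : condD n0 k0 enemy i = true
      · rw [if_pos (hcb.symm ▸ hcd), if_pos hcd]
      · rw [if_neg (by rw [hcb]; exact hcd), if_neg hcd]
        have : (i : Int) + 1 = ((i + 1 : Nat) : Int) := by push_cast; ring
        rw [this]
        exact ihd (i + 1) (by omega) (by push_cast; omega)

-- below k0 no stage is flagged, so FF 0 = FF k0
lemma FF_of_le (n0 k0 : Int) (enemy : List Int) :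
    ∀ (d i : Nat), k0.toNat - i ≤ d → (i : Int) ≤ k0 → FF n0 k0 enemy i = FF n0 k0 enemy k0.toNat := by
  intro d
  induction d with
  | zero =>
    intro i hd hik
    have : i = k0.toNat := by omega
    rw [this]
  | succ d ihd =>
    intro i hd hik
    by_cases hle : k0.toNat ≤ i
    · have : i = k0.toNat := by omega
      rw [this]
    · push_neg at hle
      by_cases hlen : enemy.length ≤ i
      · rw [FF_last n0 k0 enemy i hlen, FF_last n0 k0 enemy k0.toNat (by omega)]
      · push_neg at hlen
        rw [FF_cons n0 k0 enemy i hlen]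
        have hcd : condD n0 k0 enemy i = false := by
          simp only [condD, Bool.and_eq_false_iff]
          left
          simp only [decide_eq_false_iff_not, not_le]
          omega
        rw [hcd, if_neg (by simp)]
        exact ihd (i + 1) (by omega) (by omega)

-- the main induction: from any state satisfying INV, A's loop returns the first unclearable stage
lemma mainA (n0 k0 : Int) (enemy : List Int) (hNN : ∀ x ∈ enemy, 0 ≤ x) :
    ∀ (rest P : List Int) (n : Int) (hq : List Int) (k : Int),
    enemy = P ++ rest → INV n0 k0 P n hq k →
    solGo n k hq (P.length : Int) rest = FF n0 k0 enemy P.length := by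
  intro rest
  induction rest with
  | nil =>
    intro P n hq k hEq _
    have hlen : enemy.length = P.length := by rw [hEq]; simp
    rw [solGo, FF_last n0 k0 enemy P.length (le_of_eq hlen), hlen]
  | cons e rs ih =>
    intro P n hq k hEq hINV
    obtain ⟨pd, hperm, ⟨hkge, hkk0, hpdlen⟩, hn, hD, hEh, hF⟩ := hINV
    have he : 0 ≤ e := hNN e (by rw [hEq]; simp)
    have hilen : P.length < enemy.length := by rw [hEq]; simp
    have hLperm : (hq.map (fun x => -x)).length + pd.length = P.length := by
      have := hperm.length_eq; simpa using this
    have hSperm : (hq.map (fun x => -x)).sum + pd.sum = P.sum := by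
      have := hperm.sum_eq; simpa using this
    have htake : enemy.take (P.length + 1) = P ++ [e] := by
      rw [hEq, List.take_append]
      simp
    have hNNPe : ∀ x ∈ P ++ [e], 0 ≤ x := by
      intro x hx
      apply hNN
      rw [hEq]
      rcases List.mem_append.1 hx with h | h
      · exact List.mem_append.2 (Or.inl h)
      · simp at h; simp [h]
    have hEqPe : enemy = (P ++ [e]) ++ rs := by rw [hEq]; simp
    have hidx : (((P ++ [e]).length : Nat) : Int) = (P.length : Int) + 1 := by
      simp
    have hFFlen : (P ++ [e]).length = P.length + 1 := by simp
    rw [solGo]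
    by_cases hneg : n - e < 0
    · rw [if_pos hneg]
      by_cases hkz : k = 0
      · rw [if_neg (by simp [hkz])]
        have hk0eq : (pd.length : Int) = k0 := by omega
        have hcond : condD n0 k0 enemy P.length = true := by
          simp only [condD, Bool.and_eq_true, decide_eq_true_eq]
          refine ⟨by omega, ?_⟩
          rw [htake]
          apply L2 k0 n0 n e P pd (hq.map (fun x => -x)) hperm
            (fun x hx => hNN x (by rw [hEq]; exact List.mem_append.2 (Or.inl hx)))
            he hk0eq hD ?_ hn hneg
          intro x hx p hp
          obtain ⟨y, hy, rfl⟩ := List.mem_map.1 hx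
          exact hEh y hy p hp
        rw [FF_cons n0 k0 enemy P.length hilen, if_pos hcond]
      · rw [if_pos hkz]
        simp only [pyHeappop]
        have hk1 : 1 ≤ k := by omega
        set mn := hq.foldl min (-e) with hmndef
        have hmn_mem : mn ∈ (-e) :: hq := foldl_min_mem hq (-e)
        have hmn_le : ∀ y ∈ (-e) :: hq, mn ≤ y := foldl_min_le hq (-e)
        set hq2 := ((-e) :: hq).erase mn with hq2def
        have hH2 : hq2.map (fun x => -x) = (e :: hq.map (fun x => -x)).erase (-mn) := by
          rw [hq2def, List.map_erase (fun a b hab => by simpa using hab)]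
          simp
        have hMmem : (-mn) ∈ e :: hq.map (fun x => -x) := by
          rcases List.mem_cons.1 hmn_mem with h | h
          · rw [h]; simp
          · exact List.mem_cons_of_mem e (List.mem_map.2 ⟨mn, h, rfl⟩)
        have hMmax : ∀ v ∈ e :: hq.map (fun x => -x), v ≤ -mn := by
          intro v hv
          rcases List.mem_cons.1 hv with h | h
          · have := hmn_le (-e) (by simp)
            omega
          · obtain ⟨y, hy, rfl⟩ := List.mem_map.1 h
            have := hmn_le y (List.mem_cons_of_mem _ hy)
            omega
        have heM : e ≤ -mn := hMmax e (by simp)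
        have hperm' : (hq2.map (fun x => -x) ++ ((-mn) :: pd)).Perm (P ++ [e]) := by
          rw [hH2]
          have h1 : ((e :: hq.map (fun x => -x)).erase (-mn) ++ (-mn) :: pd).Perm
              ((-mn) :: ((e :: hq.map (fun x => -x)).erase (-mn) ++ pd)) := List.perm_middle
          have h2 : (((-mn) :: (e :: hq.map (fun x => -x)).erase (-mn)) ++ pd).Perm
              ((e :: hq.map (fun x => -x)) ++ pd) :=
            (List.perm_cons_erase hMmem).symm.append_right pd
          have h4 : (e :: (hq.map (fun x => -x) ++ pd)).Perm (e :: P) := hperm.cons e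
          have h5 : (e :: P).Perm (P ++ [e]) := by
            simpa using (List.perm_middle (l₁ := P) (l₂ := ([] : List Int)) (a := e)).symm
          exact ((h1.trans h2).trans h4).trans h5
        have hF' : 0 ≤ n - e - mn ∨ ((-mn) :: pd).length = (P ++ [e]).length := by
          rcases hF with h | h
          · left; omega
          · right
            have hhq : hq = [] := by
              have : (hq.map (fun x => -x)).length = 0 := by omega
              simpa using this
            simp only [List.length_cons, hFFlen]
            omega
        have hD' : ∀ p ∈ (-mn) :: pd, n - e - mn < p := by
          intro p hp
          rcases List.mem_cons.1 hp with rfl | hp'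
          · omega
          · rcases List.mem_cons.1 hmn_mem with hcase | hcase
            · have := hD p hp'; omega
            · have := hEh mn hcase p hp'; omega
        have hE' : ∀ x ∈ hq2, ∀ p ∈ (-mn) :: pd, -x ≤ p := by
          intro x hx p hp
          have hxall : x ∈ (-e) :: hq := List.mem_of_mem_erase hx
          have hxM : -x ≤ -mn := by have := hmn_le x hxall; omega
          rcases List.mem_cons.1 hp with rfl | hp'
          · exact hxM
          · by_cases hcase : mn = -e
            · have hq2eq : hq2 = hq := by rw [hq2def, hcase, List.erase_cons_head]
              rw [hq2eq] at hx
              exact hEh x hx p hp'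
            · have hmnhq : mn ∈ hq := by
                rcases List.mem_cons.1 hmn_mem with h | h
                · exact absurd h hcase
                · exact h
              exact le_trans hxM (hEh mn hmnhq p hp')
        have hn' : n - e - mn = n0 - (P ++ [e]).sum + ((-mn) :: pd).sum := by
          simp only [List.sum_append, List.sum_cons, List.sum_nil]
          omega
        have hINV' : INV n0 k0 (P ++ [e]) (n - e - mn) hq2 (k - 1) :=
          ⟨(-mn) :: pd, hperm', ⟨by omega, by omega, by simp only [List.length_cons]; push_cast; omega⟩,
            hn', hD', hE', hF'⟩
        have hrec := ih (P ++ [e]) (n - e - mn) hq2 (k - 1) hEqPe hINV'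
        rw [hidx, hFFlen] at hrec
        have hcond : condD n0 k0 enemy P.length = false := by
          by_cases hk0P : k0 ≤ (P.length : Int)
          · have hn2 : 0 ≤ n - e - mn := by
              rcases hF with h | h
              · omega
              · exfalso; omega
            have hpd'le : (((-mn) :: pd).length : Int) ≤ k0 := by
              simp only [List.length_cons]; push_cast; omega
            have hL1 := L1 k0 (P ++ [e]) ((-mn) :: pd) (hq2.map (fun x => -x)) hperm' hNNPe hpd'le
            simp only [condD, Bool.and_eq_false_iff]
            right
            simp only [decide_eq_false_iff_not, not_lt]
            rw [htake]
            simp only [List.sum_append, List.sum_cons, List.sum_nil] at hL1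
            omega
          · simp only [condD, Bool.and_eq_false_iff]
            left
            simp only [decide_eq_false_iff_not, not_le]
            omega
        rw [FF_cons n0 k0 enemy P.length hilen, hcond, if_neg (by simp), hrec]
    · rw [if_neg hneg]
      have hINV' : INV n0 k0 (P ++ [e]) (n - e) ((-e) :: hq) k := by
        refine ⟨pd, ?_, ⟨hkge, hkk0, by omega⟩, ?_, ?_, ?_, Or.inl (by omega)⟩
        · have h4 : (e :: (hq.map (fun x => -x) ++ pd)).Perm (e :: P) := hperm.cons e
          have h5 : (e :: P).Perm (P ++ [e]) := by
            simpa using (List.perm_middle (l₁ := P) (l₂ := ([] : List Int)) (a := e)).symm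
          simpa using h4.trans h5
        · simp only [List.sum_append, List.sum_cons, List.sum_nil]; omega
        · intro p hp; have := hD p hp; omega
        · intro x hx p hp
          rcases List.mem_cons.1 hx with rfl | hx'
          · have := hD p hp; omega
          · exact hEh x hx' p hp
      have hrec := ih (P ++ [e]) (n - e) ((-e) :: hq) k hEqPe hINV'
      rw [hidx, hFFlen] at hrec
      have hcond : condD n0 k0 enemy P.length = false := by
        by_cases hk0P : k0 ≤ (P.length : Int)
        · have hpdle : ((pd).length : Int) ≤ k0 := by omega
          have hpermPe : ((((-e) :: hq).map (fun x => -x)) ++ pd).Perm (P ++ [e]) := by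
            have h4 : (e :: (hq.map (fun x => -x) ++ pd)).Perm (e :: P) := hperm.cons e
            have h5 : (e :: P).Perm (P ++ [e]) := by
              simpa using (List.perm_middle (l₁ := P) (l₂ := ([] : List Int)) (a := e)).symm
            simpa using h4.trans h5
          have hL1 := L1 k0 (P ++ [e]) pd (((-e) :: hq).map (fun x => -x)) hpermPe hNNPe hpdle
          simp only [condD, Bool.and_eq_false_iff]
          right
          simp only [decide_eq_false_iff_not, not_lt]
          rw [htake]
          simp only [List.sum_append, List.sum_cons, List.sum_nil] at hL1
          omega
        · simp only [condD, Bool.and_eq_false_iff]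
          left
          simp only [decide_eq_false_iff_not, not_le]
          omega
      rw [FF_cons n0 k0 enemy P.length hilen, hcond, if_neg (by simp), hrec]

lemma costOf_zero (X : List Int) : costOf 0 X = X.sum := by
  unfold costOf
  rw [List.take_of_length_le (by simp [PySem.List.length_sorted])]
  exact (PySem.List.sorted_perm X _ false).sum_eq

-- with k = 0 the loop is a plain prefix-sum scan (healths of any sign)
lemma mainA0 (n0 : Int) (enemy : List Int) :
    ∀ (rest P : List Int) (n : Int) (hq : List Int),
    enemy = P ++ rest → n = n0 - P.sum →
    solGo n 0 hq (P.length : Int) rest = FF n0 0 enemy P.length := by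
  intro rest
  induction rest with
  | nil =>
    intro P n hq hEq _
    have hlen : enemy.length = P.length := by rw [hEq]; simp
    rw [solGo, FF_last n0 0 enemy P.length (le_of_eq hlen), hlen]
  | cons e rs ih =>
    intro P n hq hEq hn
    have hilen : P.length < enemy.length := by rw [hEq]; simp
    have htake : enemy.take (P.length + 1) = P ++ [e] := by
      rw [hEq, List.take_append]
      simp
    have hEqPe : enemy = (P ++ [e]) ++ rs := by rw [hEq]; simp
    have hidx : (((P ++ [e]).length : Nat) : Int) = (P.length : Int) + 1 := by simp
    have hFFlen : (P ++ [e]).length = P.length + 1 := by simp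
    rw [solGo]
    by_cases hneg : n - e < 0
    · rw [if_pos hneg, if_neg (by simp)]
      have hcond : condD n0 0 enemy P.length = true := by
        simp only [condD, Bool.and_eq_true, decide_eq_true_eq]
        refine ⟨by omega, ?_⟩
        rw [htake, costOf_zero]
        simp only [List.sum_append, List.sum_cons, List.sum_nil]
        omega
      rw [FF_cons n0 0 enemy P.length hilen, if_pos hcond]
    · rw [if_neg hneg]
      have hrec := ih (P ++ [e]) (n - e) ((-e) :: hq) hEqPe
        (by simp only [List.sum_append, List.sum_cons, List.sum_nil]; omega)
      rw [hidx, hFFlen] at hrec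
      have hcond : condD n0 0 enemy P.length = false := by
        simp only [condD, Bool.and_eq_false_iff]
        right
        simp only [decide_eq_false_iff_not, not_lt]
        rw [htake, costOf_zero]
        simp only [List.sum_append, List.sum_cons, List.sum_nil]
        omega
      rw [FF_cons n0 0 enemy P.length hilen, hcond, if_neg (by simp), hrec]

-- with at least as many tokens as remaining stages the loop always runs to the end
lemma mainTotal : ∀ (rest : List Int) (n : Int) (hq : List Int) (k idx : Int),
    (rest.length : Int) ≤ k → solGo n k hq idx rest = idx + rest.length := by
  intro rest
  induction rest with
  | nil =>
    intro n hq k idx _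
    rw [solGo]
    simp
  | cons e rs ih =>
    intro n hq k idx hk
    simp only [List.length_cons] at hk
    have hk1 : 1 ≤ k := by
      have : (0 : Int) ≤ (rs.length : Int) := by positivity
      omega
    rw [solGo]
    by_cases hneg : n - e < 0
    · rw [if_pos hneg, if_pos (by omega)]
      rw [ih _ _ (k - 1) (idx + 1) (by push_cast; omega)]
      simp only [List.length_cons]
      push_cast
      ring
    · rw [if_neg hneg, ih _ _ k (idx + 1) (by push_cast; omega)]
      simp only [List.length_cons]
      push_cast
      ring

lemma alt_of_len_le (n0 k0 : Int) (enemy : List Int) (h : (enemy.length : Int) ≤ k0) :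
    solution_alt n0 k0 enemy = (enemy.length : Int) := by
  unfold solution_alt
  rw [PySem.List.pyRange_one_eq_nil h]
  rfl

lemma alt_eq_FF (n0 k0 : Int) (enemy : List Int) (hk : 0 ≤ k0) :
    solution_alt n0 k0 enemy = FF n0 k0 enemy 0 := by
  unfold solution_alt
  have h1 : PySem.List.pyRange k0 (enemy.length : Int) 1
      = PySem.List.pyRange ((k0.toNat : Nat) : Int) (enemy.length : Int) 1 := by
    rw [Int.toNat_of_nonneg hk]
  rw [h1, altGo_eq n0 k0 enemy hk enemy.length k0.toNat (by omega) (by omega),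
    FF_of_le n0 k0 enemy k0.toNat 0 (by omega) (by omega)]

-- ===== VERDICT (by name: the statement is the Claim_ definition above) =====
theorem solution_spec : Claim_equal_solution := by
  intro n k enemy hdom hpre
  obtain ⟨hk, hdisj⟩ := hpre
  unfold Spec_solution
  unfold solution
  by_cases hlc : (enemy.length : Int) = k
  · rw [if_pos hlc, alt_of_len_le n k enemy (le_of_eq hlc), hlc]
  · rw [if_neg hlc]
    rcases hdisj with hk0 | hlen | hNN
    · subst hk0
      rw [alt_eq_FF n 0 enemy (le_refl 0)]
      have h0 : solGo n 0 [] ((List.length ([] : List Int)) : Int) enemy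
          = FF n 0 enemy (List.length ([] : List Int)) :=
        mainA0 n enemy enemy [] n [] (by simp) (by simp)
      simpa using h0
    · rw [alt_of_len_le n k enemy hlen, mainTotal enemy n [] k 0 hlen]
      ring
    · rw [alt_eq_FF n k enemy hk]
      have h0 : solGo n k [] ((List.length ([] : List Int)) : Int) enemy = FF n k enemy (List.length ([] : List Int)) := by
        apply mainA n k enemy hNN enemy [] n [] k (by simp)
        refine ⟨[], by simp, ⟨hk, le_refl _, by simp⟩, by simp, by simp, by simp, Or.inr rfl⟩
      simpa using h0
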